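-- pv_equiv track=rewrite | github.com/epilectrik/voynich | context/generate_expert_context.py | _strip_yaml_provenance_maps
-- ===== SOURCE A (Python) =====
-- def _strip_yaml_provenance_maps(content):
--     """Strip aggregate provenance_map sections from structural contracts.
--
--     The inline provenance: fields on individual entries are sufficient.
--     The large provenance_map sections at the end just repeat the same
--     constraint numbers in aggregate form.
--     """
--     lines = content.split('\n')
--     filtered = []
--     skip_provenance = False
--
--     for line in lines:
--         stripped = line.strip()
--
--         # Detect start of provenance, provenance_map, or provenance_summary section
--         if stripped in ('provenance:', 'provenance_map:', 'provenance_summary:'):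
--             skip_provenance = True
--             continue
--
--         # Stop skipping when we hit a new top-level key or section divider
--         # Check ORIGINAL line for indentation — indented lines are still part of
--         # the provenance section; only unindented keys signal a new section
--         if skip_provenance:
--             is_section_divider = stripped.startswith('# ====')
--             is_top_level_key = (stripped and line[0:1] not in (' ', '\t', '')
--                                 and not stripped.startswith('#')
--                                 and not stripped.startswith('-')
--                                 and ':' in stripped)
--             if is_section_divider or is_top_level_key:
--                 skip_provenance = False
--             else:
--                 continue
--
--         filtered.append(line)
--
--     return '\n'.join(filtered)
-- ===== SOURCE B (Python) =====
-- def _strip_yaml_provenance_maps(content):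
--     """Strip aggregate provenance_map sections from structural contracts.
--
--     Staged rewrite: (1) classify every line as marker / boundary / other,
--     (2) prefix-scan the classifications to record the last marker-or-boundary
--     event strictly before each line, (3) keep a line iff it is not a marker
--     and is either a boundary or not preceded (most recently) by a marker.
--     """
--     lines = content.split('\n')
--
--     def classify(line):
--         stripped = line.strip()
--         if stripped in ('provenance:', 'provenance_map:', 'provenance_summary:'):
--             return 2  # marker: starts a provenance section
--         if stripped.startswith('# ====') or (stripped and line[0:1] not in (' ', '\t', '')
--                                              and not stripped.startswith('#')
--                                              and not stripped.startswith('-')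
--                                              and ':' in stripped):
--             return 1  # boundary: section divider or unindented top-level key
--         return 0
--
--     tags = [classify(l) for l in lines]
--     # last nonzero tag strictly before each position (1 = "no open section")
--     prevs = []
--     prev = 1
--     for t in tags:
--         prevs.append(prev)
--         if t:
--             prev = t
--     kept = [l for l, t, p in zip(lines, tags, prevs)
--             if t != 2 and (t == 1 or p != 2)]
--     return '\n'.join(kept)
-- ===== Notes on version B (the rewrite author's own statement) =====
-- stated objective: alternative
-- what changed: Replaces A's stateful filter loop (a skip flag deciding per line whether to append) by three staged passes: classify every line as marker/boundary/other, prefix-scan the classifications to record the last event before each line, then keep lines by a declarative predicate over (tag, previous-event) pairs.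
import Mathlib
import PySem

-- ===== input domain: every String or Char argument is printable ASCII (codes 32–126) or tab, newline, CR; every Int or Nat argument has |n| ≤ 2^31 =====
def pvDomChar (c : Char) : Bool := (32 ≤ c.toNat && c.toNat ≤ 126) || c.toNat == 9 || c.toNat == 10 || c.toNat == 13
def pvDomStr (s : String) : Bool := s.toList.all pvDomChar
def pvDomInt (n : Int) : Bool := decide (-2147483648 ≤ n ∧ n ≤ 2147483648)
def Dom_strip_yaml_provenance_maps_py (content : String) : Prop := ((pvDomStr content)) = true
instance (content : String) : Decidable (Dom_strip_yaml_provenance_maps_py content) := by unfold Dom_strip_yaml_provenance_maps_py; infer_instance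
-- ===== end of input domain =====

-- B replaces A's stateful filter loop by three staged passes (classify lines,
-- prefix-scan the last event, filter by a declarative predicate); objective: alternative.

-- ===== PORT A =====
-- stripped in ('provenance:', 'provenance_map:', 'provenance_summary:')
def pvIsMarker (line : String) : Bool :=
  let stripped := PySem.Str.strip line
  stripped == "provenance:" || stripped == "provenance_map:" || stripped == "provenance_summary:"

-- stripped.startswith('# ====') or (stripped and line[0:1] not in (' ', '\t', '')
--   and not stripped.startswith('#') and not stripped.startswith('-') and ':' in stripped)
def pvIsBoundary (line : String) : Bool :=
  let stripped := PySem.Str.strip line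
  let first := PySem.Str.slice line (some 0) (some 1)
  PySem.Str.startswith stripped "# ====" ||
    (!(stripped == "") && !(first == " " || first == "\t" || first == "") &&
      !(PySem.Str.startswith stripped "#") && !(PySem.Str.startswith stripped "-") &&
      PySem.Str.isIn ":" stripped)

-- the body of A's for-loop: state = (filtered, skip_provenance)
def pvAStep (st : List String × Bool) (line : String) : List String × Bool :=
  if pvIsMarker line then (st.1, true)
  else if st.2 then
    if pvIsBoundary line then (st.1 ++ [line], false)
    else (st.1, true)
  else (st.1 ++ [line], st.2)

def strip_yaml_provenance_maps_py (content : String) : String :=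
  -- lines = content.split('\n'); sep "\n" ≠ "" so split? is some
  PySem.Str.join "\n" ((((PySem.Str.split? content "\n").getD []).foldl pvAStep ([], false)).1)

-- ===== PORT B =====
-- Source B's classify(line): 2 = provenance marker, 1 = section boundary, 0 = other
def pvClassify (line : String) : Nat :=
  if pvIsMarker line then 2 else if pvIsBoundary line then 1 else 0

-- Source B's prefix-scan loop: prevs.append(prev); if t: prev = t
def pvPrevsStep (st : List Nat × Nat) (t : Nat) : List Nat × Nat :=
  (st.1 ++ [st.2], if t ≠ 0 then t else st.2)

def strip_yaml_provenance_maps_py_alt (content : String) : String :=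
  let lines := (PySem.Str.split? content "\n").getD []
  let tags := lines.map pvClassify
  let prevs := (tags.foldl pvPrevsStep ([], 1)).1
  let kept := ((lines.zip (tags.zip prevs)).filter
      (fun x => x.2.1 != 2 && (x.2.1 == 1 || x.2.2 != 2))).map (·.1)
  PySem.Str.join "\n" kept

-- ===== PRECONDITION & SPEC =====
def Spec_strip_yaml_provenance_maps_py (content : String) (out : String) : Prop := out = strip_yaml_provenance_maps_py_alt content
instance (content : String) (out : String) : Decidable (Spec_strip_yaml_provenance_maps_py content out) := by unfold Spec_strip_yaml_provenance_maps_py; infer_instance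

-- ===== CLAIM (what is proved, stated in full; the proofs are below) =====
def Claim_equal_strip_yaml_provenance_maps_py : Prop := ∀ (content : String), Dom_strip_yaml_provenance_maps_py content → Spec_strip_yaml_provenance_maps_py content (strip_yaml_provenance_maps_py content)

-- ===== LEMMAS AND PROOFS =====

-- A's flag loop, rebuilt as pure recursion (proof helper)
def pvARec : List String → Bool → List String
  | [], _ => []
  | line :: rest, skip =>
    if pvIsMarker line then pvARec rest true
    else if skip then
      if pvIsBoundary line then line :: pvARec rest false
      else pvARec rest true
    else line :: pvARec rest false

theorem pvFoldl_eq_aRec (lines : List String) (acc : List String) (skip : Bool) :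
    (lines.foldl pvAStep (acc, skip)).1 = acc ++ pvARec lines skip := by
  induction lines generalizing acc skip with
  | nil => simp [pvARec]
  | cons line rest ih =>
      simp only [List.foldl_cons, pvAStep, pvARec]
      by_cases hm : pvIsMarker line = true
      · simp [hm, ih]
      · by_cases hs : skip = true
        · by_cases hb : pvIsBoundary line = true
          · simp [hm, hs, hb, ih]
          · simp [hm, hs, hb, ih]
        · simp at hs
          simp [hm, hs, ih]

-- B's prefix-scan fold, rebuilt as pure recursion (proof helper)
def pvPrevsRec : List Nat → Nat → List Nat
  | [], _ => []
  | t :: ts, p => p :: pvPrevsRec ts (if t ≠ 0 then t else p)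

theorem pvPrevsFoldl_eq (tags : List Nat) (acc : List Nat) (p : Nat) :
    (tags.foldl pvPrevsStep (acc, p)).1 = acc ++ pvPrevsRec tags p := by
  induction tags generalizing acc p with
  | nil => simp [pvPrevsRec]
  | cons t ts ih => simp [pvPrevsStep, pvPrevsRec, ih]

-- core: B's staged filter equals A's flag recursion (p = 2 encodes skip = true)
theorem pvB_eq_aRec (lines : List String) :
    ∀ p : Nat, p = 1 ∨ p = 2 →
      ((lines.zip ((lines.map pvClassify).zip (pvPrevsRec (lines.map pvClassify) p))).filter
          (fun x => x.2.1 != 2 && (x.2.1 == 1 || x.2.2 != 2))).map (·.1)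
        = pvARec lines (p == 2) := by
  induction lines with
  | nil => intro p _; simp [pvPrevsRec, pvARec]
  | cons line rest ih =>
      intro p hp
      simp only [List.map_cons, pvPrevsRec, List.zip_cons_cons, List.filter_cons]
      by_cases hm : pvIsMarker line = true
      · have ht : pvClassify line = 2 := by simp [pvClassify, hm]
        rw [ht]
        have := ih 2 (Or.inr rfl)
        simp only [pvARec, hm]
        simpa using this
      · by_cases hb : pvIsBoundary line = true
        · have ht : pvClassify line = 1 := by simp [pvClassify, hm, hb]
          rw [ht]
          have := ih 1 (Or.inl rfl)
          rcases hp with h | h <;> subst h <;>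
            simp_all [pvARec]
        · have ht : pvClassify line = 0 := by simp [pvClassify, hm, hb]
          rw [ht]
          rcases hp with h | h <;> subst h
          · have := ih 1 (Or.inl rfl)
            simp_all [pvARec]
          · have := ih 2 (Or.inr rfl)
            simp_all [pvARec]

-- ===== VERDICT (by name: the statement is the Claim_ definition above) =====
theorem strip_yaml_provenance_maps_py_spec : Claim_equal_strip_yaml_provenance_maps_py := by
  intro content _
  unfold Spec_strip_yaml_provenance_maps_py strip_yaml_provenance_maps_py strip_yaml_provenance_maps_py_alt
  rw [pvFoldl_eq_aRec, List.nil_append]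
  simp only [pvPrevsFoldl_eq, List.nil_append]
  rw [pvB_eq_aRec _ 1 (Or.inl rfl)]
  rfl
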